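-- pv_equiv track=rewrite | github.com/uditv120/tds-virtual-ta | utils/Hybrid_query1.py | dedupe_and_merge
-- ===== SOURCE A (Python) =====
-- def dedupe_and_merge(faiss_results, bm25_results, max_results=5):
--     seen_urls = set()
--     merged = []
--
--     def add_unique(results):
--         for item in results:
--             url = item.get("url") or item.get("source")
--             if url and url not in seen_urls:
--                 seen_urls.add(url)
--                 merged.append(item)
--             if len(merged) >= max_results:
--                 break
--
--     add_unique(faiss_results)
--     add_unique(bm25_results)
--     return merged[:max_results]
-- ===== SOURCE B (Python) =====
-- def dedupe_and_merge(faiss_results, bm25_results, max_results=5):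
--     def key(item):
--         return item.get("url") or item.get("source")
--
--     out = []
--     pending = faiss_results + bm25_results
--     while pending:
--         head, rest = pending[0], pending[1:]
--         k = key(head)
--         if k:
--             out.append(head)
--             # discard every later occurrence of this key in one sweep
--             pending = [it for it in rest if key(it) != k]
--         else:
--             pending = rest
--     return out[:max_results]
-- ===== Notes on version B (the rewrite author's own statement) =====
-- stated objective: alternative
-- what changed: Replaces A's seen-set accumulator with per-call early break by a worklist algorithm: repeatedly take the first remaining item and, when its resolved url is truthy, emit it and filter all later items with the same key out of the remaining worklist (no seen set, no break), slicing once at the end.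
import Mathlib
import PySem

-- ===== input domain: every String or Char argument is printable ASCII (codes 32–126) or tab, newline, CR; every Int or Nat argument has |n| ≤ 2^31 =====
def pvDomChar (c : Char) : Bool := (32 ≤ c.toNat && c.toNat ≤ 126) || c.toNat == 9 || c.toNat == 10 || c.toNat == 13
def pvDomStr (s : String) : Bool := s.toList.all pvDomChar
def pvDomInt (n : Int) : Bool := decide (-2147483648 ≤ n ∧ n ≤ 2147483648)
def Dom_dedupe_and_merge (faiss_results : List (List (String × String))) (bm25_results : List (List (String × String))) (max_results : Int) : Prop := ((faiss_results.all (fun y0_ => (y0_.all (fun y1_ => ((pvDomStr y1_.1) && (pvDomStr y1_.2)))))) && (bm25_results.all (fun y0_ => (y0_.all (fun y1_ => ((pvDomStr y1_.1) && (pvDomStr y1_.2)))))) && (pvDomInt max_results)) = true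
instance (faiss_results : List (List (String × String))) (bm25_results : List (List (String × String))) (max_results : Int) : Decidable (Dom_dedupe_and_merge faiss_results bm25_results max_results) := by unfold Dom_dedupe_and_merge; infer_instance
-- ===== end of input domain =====

-- B replaces A's seen-set accumulation with per-call early break by a worklist algorithm:
-- take the first remaining item, emit it if its resolved url is truthy, and filter every
-- later item with that key out of the remaining worklist; one slice at the end
-- (objective: alternative).

-- item.get(k) on an item dict (shared line of both Pythons: first-match association lookup)
def pvItemGet (item : List (String × String)) (k : String) : Option String :=
  (item.find? (fun p => p.1 == k)).map (·.2)

-- item.get("url") or item.get("source")  (Python 'or': falsy = None or "")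
def pvResolveUrl (item : List (String × String)) : Option String :=
  match pvItemGet item "url" with
  | some s => if s = "" then pvItemGet item "source" else some s
  | none => pvItemGet item "source"

-- ===== PORT A =====
-- the nested add_unique: loop over results mutating (seen_urls, merged), breaking when full
def pvAddUnique (max_results : Int) :
    List (List (String × String)) → PySem.Set String → List (List (String × String)) →
    PySem.Set String × List (List (String × String))
  | [], seen, merged => (seen, merged)
  | item :: rest, seen, merged =>
    let st :=
      match pvResolveUrl item with
      | some u =>
          if u ≠ "" ∧ u ∉ seen then (PySem.Set.add seen u, merged ++ [item]) else (seen, merged)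
      | none => (seen, merged)
    if max_results ≤ (st.2.length : Int) then st
    else pvAddUnique max_results rest st.1 st.2

def dedupe_and_merge (faiss_results : List (List (String × String))) (bm25_results : List (List (String × String))) (max_results : Int) : List (List (String × String)) :=
  let st1 := pvAddUnique max_results faiss_results PySem.Set.empty []
  let st2 := pvAddUnique max_results bm25_results st1.1 st1.2
  PySem.List.slice st2.2 none (some max_results)

-- ===== PORT B =====
-- B's while loop: (pending, out); filtering strictly shrinks pending, hence termination
def pvWorklist : List (List (String × String)) → List (List (String × String)) →
    List (List (String × String))
  | [], out => out
  | head :: rest, out =>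
    match pvResolveUrl head with
    | some k =>
        if k = "" then pvWorklist rest out
        else pvWorklist (rest.filter (fun it => decide (pvResolveUrl it ≠ some k)))
               (out ++ [head])
    | none => pvWorklist rest out
termination_by pending _ => pending.length
decreasing_by
  all_goals simp_all
  all_goals (have h := List.length_filter_le (fun (x : {x // x ∈ rest}) => decide (pvResolveUrl x.1 ≠ some k)) rest.attach; simp at h; omega)

def dedupe_and_merge_alt (faiss_results : List (List (String × String))) (bm25_results : List (List (String × String))) (max_results : Int) : List (List (String × String)) :=
  PySem.List.slice (pvWorklist (faiss_results ++ bm25_results) []) none (some max_results)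

-- ===== PRECONDITION & SPEC =====
-- Pre_ excludes negative max_results (outside the function's natural domain): there A's
-- per-call early break interacts with Python's negative slicing to return an accidental
-- prefix of a partially built list, an artefact of A's implementation.
def Pre_dedupe_and_merge (faiss_results : List (List (String × String))) (bm25_results : List (List (String × String))) (max_results : Int) : Prop :=
  0 ≤ max_results
instance (faiss_results : List (List (String × String))) (bm25_results : List (List (String × String))) (max_results : Int) : Decidable (Pre_dedupe_and_merge faiss_results bm25_results max_results) := by unfold Pre_dedupe_and_merge; infer_instance

def pvWitness_dedupe_and_merge : (List (List (String × String))) × (List (List (String × String))) × Int :=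
  ([[("url", "a")], [("url", "b")]], [[("source", "c")]], 2)

def Spec_dedupe_and_merge (faiss_results : List (List (String × String))) (bm25_results : List (List (String × String))) (max_results : Int) (out : List (List (String × String))) : Prop := out = dedupe_and_merge_alt faiss_results bm25_results max_results
instance (faiss_results : List (List (String × String))) (bm25_results : List (List (String × String))) (max_results : Int) (out : List (List (String × String))) : Decidable (Spec_dedupe_and_merge faiss_results bm25_results max_results out) := by unfold Spec_dedupe_and_merge; infer_instance

-- ===== CLAIM (what is proved, stated in full; the proofs are below) =====
def Claim_equal_dedupe_and_merge : Prop := ∀ (faiss_results : List (List (String × String))) (bm25_results : List (List (String × String))) (max_results : Int), Dom_dedupe_and_merge faiss_results bm25_results max_results → Pre_dedupe_and_merge faiss_results bm25_results max_results → Spec_dedupe_and_merge faiss_results bm25_results max_results (dedupe_and_merge faiss_results bm25_results max_results)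

-- ===== LEMMAS AND PROOFS =====

-- ghost: the full (unbounded) seen-set dedup pass: final seen set and the items appended
def pvDedup : List (List (String × String)) → PySem.Set String →
    PySem.Set String × List (List (String × String))
  | [], seen => (seen, [])
  | item :: rest, seen =>
    match pvResolveUrl item with
    | some u =>
        if u ≠ "" ∧ u ∉ seen then
          let r := pvDedup rest (PySem.Set.add seen u)
          (r.1, item :: r.2)
        else pvDedup rest seen
    | none => pvDedup rest seen

lemma pvDedup_append (xs ys : List (List (String × String))) (seen : PySem.Set String) :
    pvDedup (xs ++ ys) seen =
      ((pvDedup ys (pvDedup xs seen).1).1,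
       (pvDedup xs seen).2 ++ (pvDedup ys (pvDedup xs seen).1).2) := by
  induction xs generalizing seen with
  | nil => simp [pvDedup]
  | cons item rest ih =>
    simp only [List.cons_append, pvDedup]
    cases h : pvResolveUrl item with
    | none => exact ih seen
    | some u =>
      by_cases hc : u ≠ "" ∧ u ∉ seen
      · simp only [if_pos hc, ih (PySem.Set.add seen u)]; simp
      · simp only [if_neg hc]; exact ih seen

-- items still eligible with respect to a seen set (the ghost filter the worklist maintains)
def pvElig (seen : PySem.Set String) (it : List (String × String)) : Bool :=
  (pvResolveUrl it).elim true (fun u => if u = "" then true else !(decide (u ∈ seen)))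

lemma pvElig_add (seen : PySem.Set String) (u : String) (hu : u ≠ "")
    (it : List (String × String)) :
    pvElig (PySem.Set.add seen u) it
      = (pvElig seen it && decide (pvResolveUrl it ≠ some u)) := by
  unfold pvElig
  cases h : pvResolveUrl it with
  | none => simp
  | some v =>
    by_cases hv : v = ""
    · subst hv; simp [Ne.symm hu]
    · simp only [PySem.Set.mem_add]
      by_cases h1 : v ∈ seen <;> by_cases h2 : v = u <;> simp [h1, h2, hu]

-- B's worklist on the eligible remainder computes out ++ the ghost dedup result
lemma pvWorklist_eq_dedup (items : List (List (String × String)))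
    (seen : PySem.Set String) (out : List (List (String × String))) :
    pvWorklist (items.filter (pvElig seen)) out = out ++ (pvDedup items seen).2 := by
  induction items generalizing seen out with
  | nil => simp [pvWorklist, pvDedup]
  | cons item rest ih =>
    simp only [pvDedup]
    by_cases he : pvElig seen item = true
    · rw [List.filter_cons_of_pos he]
      cases h : pvResolveUrl item with
      | none =>
        simp only [pvWorklist, h]
        exact ih seen out
      | some u =>
        by_cases hu : u = ""
        · subst hu
          simp only [pvWorklist, h]
          have hng : ¬ (("" : String) ≠ "" ∧ "" ∉ seen) := by simp
          rw [if_neg hng]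
          exact ih seen out
        · have hnotin : u ∉ seen := by
            simp only [pvElig, h, Option.elim, if_neg hu] at he
            simpa using he
          simp only [pvWorklist, h, if_neg hu]
          rw [if_pos ⟨hu, hnotin⟩]
          have hcomp : (rest.filter (pvElig seen)).filter
              (fun it => decide (pvResolveUrl it ≠ some u))
              = rest.filter (pvElig (PySem.Set.add seen u)) := by
            rw [List.filter_filter]
            exact List.filter_congr (fun it _ => by
              rw [pvElig_add seen u hu it, Bool.and_comm])
          rw [hcomp, ih (PySem.Set.add seen u) (out ++ [item])]
          simp
    · rw [List.filter_cons_of_neg he]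
      cases h : pvResolveUrl item with
      | none => simp [pvElig, h] at he
      | some u =>
        simp only [pvElig, h, Option.elim] at he
        by_cases hu : u = ""
        · rw [if_pos hu] at he; simp at he
        · rw [if_neg hu] at he
          have hin : u ∈ seen := by simpa using he
          have hng : ¬ (u ≠ "" ∧ u ∉ seen) := by simp [hin]
          dsimp only
          rw [if_neg hng]
          exact ih seen out

-- once merged is already full, add_unique changes nothing below index max_results
lemma pvAddUnique_full (max_results : Int) (items : List (List (String × String)))
    (seen : PySem.Set String) (merged : List (List (String × String)))
    (hfull : max_results ≤ (merged.length : Int)) :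
    (pvAddUnique max_results items seen merged).2.take max_results.toNat =
      merged.take max_results.toNat := by
  cases items with
  | nil => simp [pvAddUnique]
  | cons item rest =>
    have hn : max_results.toNat ≤ merged.length := by omega
    simp only [pvAddUnique]
    cases h : pvResolveUrl item with
    | none =>
      dsimp only
      rw [if_pos (by simpa using hfull)]
    | some u =>
      dsimp only
      by_cases hc : u ≠ "" ∧ u ∉ seen
      · simp only [if_pos hc]
        rw [if_pos (show max_results ≤ (((merged ++ [item]).length : Nat) : Int) by simp; omega)]
        simp [List.take_append_of_le_length hn]
      · simp only [if_neg hc]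
        rw [if_pos (by simpa using hfull)]

-- main invariant for add_unique: either it ran to the end (no break) and equals the ghost
-- dedup, or it broke with merged full and agreeing with the ghost result below max_results
lemma pvAddUnique_main (max_results : Int) (items : List (List (String × String)))
    (seen : PySem.Set String) (merged : List (List (String × String))) :
    pvAddUnique max_results items seen merged
      = ((pvDedup items seen).1, merged ++ (pvDedup items seen).2)
    ∨ (max_results ≤ ((pvAddUnique max_results items seen merged).2.length : Int)
       ∧ (pvAddUnique max_results items seen merged).2.take max_results.toNat
           = (merged ++ (pvDedup items seen).2).take max_results.toNat) := by
  induction items generalizing seen merged with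
  | nil => left; simp [pvAddUnique, pvDedup]
  | cons item rest ih =>
    simp only [pvAddUnique, pvDedup]
    cases h : pvResolveUrl item with
    | none =>
      dsimp only
      by_cases hbr : max_results ≤ ((merged.length : Int))
      · rw [if_pos (by simpa using hbr)]
        right
        refine ⟨by simpa using hbr, ?_⟩
        have hn : max_results.toNat ≤ merged.length := by omega
        simp [List.take_append_of_le_length hn]
      · rw [if_neg (by simpa using hbr)]
        exact ih seen merged
    | some u =>
      dsimp only
      by_cases hc : u ≠ "" ∧ u ∉ seen
      · simp only [if_pos hc]
        by_cases hbr : max_results ≤ (((merged ++ [item]).length : Int))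
        · rw [if_pos (by simpa using hbr)]
          right
          refine ⟨by simpa using hbr, ?_⟩
          have hn : max_results.toNat ≤ merged.length + 1 := by simp at hbr; omega
          rw [List.take_append, List.take_append]
          have : (max_results.toNat - merged.length) ≤ 1 := by omega
          interval_cases hk : (max_results.toNat - merged.length) <;> simp
        · rw [if_neg (by simpa using hbr)]
          rcases ih (PySem.Set.add seen u) (merged ++ [item]) with heq | ⟨hlen, htk⟩
          · left
            rw [heq]; simp
          · right
            refine ⟨hlen, ?_⟩
            rw [htk]; simp
      · simp only [if_neg hc]
        by_cases hbr : max_results ≤ ((merged.length : Int))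
        · rw [if_pos (by simpa using hbr)]
          right
          refine ⟨by simpa using hbr, ?_⟩
          have hn : max_results.toNat ≤ merged.length := by omega
          simp [List.take_append_of_le_length hn]
        · rw [if_neg (by simpa using hbr)]
          exact ih seen merged

-- ===== VERDICT (by name: the statement is the Claim_ definition above) =====
theorem dedupe_and_merge_spec : Claim_equal_dedupe_and_merge := by
  intro f b m _ hpre
  unfold Spec_dedupe_and_merge dedupe_and_merge dedupe_and_merge_alt
  have hslice : ∀ xs : List (List (String × String)),
      PySem.List.slice xs none (some m) = xs.take m.toNat := fun xs =>
    PySem.List.slice_to xs hpre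
  rw [hslice, hslice]
  have hfull : (f ++ b).filter (pvElig PySem.Set.empty) = f ++ b :=
    List.filter_eq_self.mpr (fun it _ => by
      unfold pvElig
      cases h : pvResolveUrl it with
      | none => simp
      | some u => by_cases hu : u = "" <;> simp [hu, PySem.Set.empty])
  rw [← hfull, pvWorklist_eq_dedup, List.nil_append, pvDedup_append]
  set S1 := pvDedup f (PySem.Set.empty : PySem.Set String) with hS1
  rcases pvAddUnique_main m f PySem.Set.empty [] with h1 | ⟨hlen1, htk1⟩
  · rw [h1]
    simp only [List.nil_append]
    rcases pvAddUnique_main m b S1.1 S1.2 with h2 | ⟨hlen2, htk2⟩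
    · rw [h2]
    · rw [htk2]
  · have h2 := pvAddUnique_full m b
      (pvAddUnique m f PySem.Set.empty []).1 (pvAddUnique m f PySem.Set.empty []).2 hlen1
    rw [h2, htk1]
    simp only [List.nil_append] at *
    have hX : m.toNat ≤ (pvDedup f PySem.Set.empty).2.length := by
      have hlt := congrArg List.length htk1
      simp only [List.length_take] at hlt
      omega
    rw [List.take_append_of_le_length hX]
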